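-- pv_equiv track=rewrite | github.com/jdukatz/keyPhraseAnalysis | acronym_extractor.py | find_words_for_acr
-- ===== SOURCE A (Python) =====
-- def find_words_for_acr(acronym, tokens):
-- 	num_words = len(acronym)
-- 	match = {}
-- 	i = 0
-- 	while i < (len(tokens) - num_words):
-- 		n_gram = []
-- 		for j in range(i, i + num_words):
-- 			n_gram.append(tokens[j])
-- 		letters = [word[0] for word in n_gram]
-- 		potential_acronym = ''.join(letters).upper()
-- 		if acronym == potential_acronym:
-- 			match = {acronym: n_gram}
-- 		i += 1
-- 	return match
-- ===== SOURCE B (Python) =====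
-- def find_words_for_acr(acronym, tokens):
--     initials = ''.join(t[:1] for t in tokens).upper()
--     pos = initials.rfind(acronym)
--     if pos == -1:
--         return {}
--     return {acronym: tokens[pos:pos + len(acronym)]}
-- ===== Notes on version B (the rewrite author's own statement) =====
-- stated objective: alternative
-- what changed: B builds a single string of the tokens' uppercased first letters once and delegates the whole window search to str.rfind (rightmost substring occurrence) followed by one slice, instead of A's explicit sliding-window loop that rebuilds every n-gram, joins and uppercases it, and keeps overwriting a dict; B also considers the last window, which A's off-by-one loop bound (i < len(tokens)-k instead of <=) skips.
-- intended difference: On inputs whose last k-token window's initials spell the acronym and where A's rightmost earlier match (if any) is a different word list, A skips that last window (loop bound is len(tokens)-k exclusive) and returns {} or the earlier window, while B returns the last window, which is the intended result of a search over all windows. — e.g. on find_words_for_acr("AB", ["x", "a", "bat"]): A returns [], B returns [("AB", ["a", "bat"])]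
import Mathlib
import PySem

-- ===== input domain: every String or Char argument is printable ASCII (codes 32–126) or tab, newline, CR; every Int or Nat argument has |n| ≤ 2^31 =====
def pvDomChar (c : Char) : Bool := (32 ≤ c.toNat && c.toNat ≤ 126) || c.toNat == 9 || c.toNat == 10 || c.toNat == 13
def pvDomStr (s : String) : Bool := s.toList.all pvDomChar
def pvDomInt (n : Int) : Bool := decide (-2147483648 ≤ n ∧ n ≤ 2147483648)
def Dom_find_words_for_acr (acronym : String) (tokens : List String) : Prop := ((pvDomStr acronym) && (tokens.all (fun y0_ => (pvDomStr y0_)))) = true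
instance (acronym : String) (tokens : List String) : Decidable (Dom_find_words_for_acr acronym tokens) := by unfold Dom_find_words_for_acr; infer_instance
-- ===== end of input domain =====

-- B joins the tokens' uppercased first letters into one string once and delegates the window
-- search to str.rfind (rightmost occurrence), then takes a single slice (objective: alternative
-- algorithm — substring search over the initials string instead of A's sliding-window loop);
-- B also considers the final window, which A's exclusive loop bound skips — the intended
-- difference stated in D_.


-- ===== PORT A =====
-- the while-loop of A: i counts up, `m` is the dict `match`; the Nat fuel only makes the
-- recursion structural (it is the number of remaining iterations, the condition stays ported)
def findAcrUp (acronym : String) (tokens : List String) :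
    Nat → Int → List (String × List String) → List (String × List String)
  | 0, _i, m => m
  | fuel + 1, i, m =>
    if i < (tokens.length : Int) - (acronym.toList.length : Int) then
      let n_gram := (PySem.List.pyRange i (i + (acronym.toList.length : Int)) 1).foldl
          (fun acc j => acc ++ [PySem.List.pyGetD tokens j ""]) []
      -- word[0] : PySem raises (none) on an empty word; the default is only reached outside Pre_
      let letters := n_gram.map (fun word => (PySem.List.pyGet? word.toList 0).getD ' ')
      let potential := PySem.Chars.upper letters
      let m' := if acronym.toList = potential then [(acronym, n_gram)] else m
      findAcrUp acronym tokens fuel (i + 1) m'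
    else m

def find_words_for_acr (acronym : String) (tokens : List String) : List (String × List String) :=
  findAcrUp acronym tokens ((tokens.length : Int) - (acronym.toList.length : Int)).toNat 0 []

-- ===== PORT B =====
-- initials = ''.join(t[:1] for t in tokens).upper(); pos = initials.rfind(acronym);
-- return {} if pos == -1 else {acronym: tokens[pos:pos + len(acronym)]}
def find_words_for_acr_alt (acronym : String) (tokens : List String) : List (String × List String) :=
  let initials := PySem.Chars.upper
    (PySem.Chars.join [] (tokens.map (fun t => PySem.Chars.slice t.toList none (some 1))))
  let pos := PySem.Chars.rfind initials acronym.toList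
  if pos = -1 then []
  else [(acronym, PySem.List.slice tokens (some pos) (some (pos + (acronym.toList.length : Int))))]

-- ===== PRECONDITION & SPEC =====
-- Pre_ excludes exactly the inputs where A raises IndexError: word[0] on an empty token; A's loop
-- reads tokens[0..n-2] (= dropLast) iff the acronym is nonempty and strictly shorter than tokens.
def Pre_find_words_for_acr (acronym : String) (tokens : List String) : Prop :=
  acronym.toList = [] ∨ tokens.length ≤ acronym.toList.length ∨ "" ∉ tokens.dropLast
instance (acronym : String) (tokens : List String) : Decidable (Pre_find_words_for_acr acronym tokens) := by unfold Pre_find_words_for_acr; infer_instance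

def pvWitness_find_words_for_acr : String × List String := ("AB", ["a", "bat", "cat"])

-- On inputs whose last k-token window's uppercased initials spell the acronym and where A's
-- rightmost earlier matching window (if any) is a different word list, A skips that last window
-- (exclusive loop bound) and returns {} or the earlier window, while B returns the last window —
-- the intended result of a search over all windows.
def D_find_words_for_acr (acronym : String) (tokens : List String) : Prop :=
  let w := fun i => (tokens.drop i).take acronym.toList.length
  let sp := fun i => (w i).flatMap (fun t => (t.toList.map PySem.Chars.upperChar).take 1) == acronym.toList
  let L := tokens.length - acronym.toList.length
  sp L = true ∧ ((List.range L).filter sp).getLast?.all (fun r => w r != w L) = true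
instance (acronym : String) (tokens : List String) : Decidable (D_find_words_for_acr acronym tokens) := by unfold D_find_words_for_acr; infer_instance

def Spec_find_words_for_acr (acronym : String) (tokens : List String) (out : List (String × List String)) : Prop := ¬ D_find_words_for_acr acronym tokens → out = find_words_for_acr_alt acronym tokens
instance (acronym : String) (tokens : List String) (out : List (String × List String)) : Decidable (Spec_find_words_for_acr acronym tokens out) := by unfold Spec_find_words_for_acr; infer_instance

def pvDiffWitness_find_words_for_acr : String × List String := ("AB", ["x", "a", "bat"])
def pvDiffWitnessOut_find_words_for_acr : (List (String × List String)) × (List (String × List String)) :=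
  ([], [("AB", ["a", "bat"])])

-- ===== CLAIM (what is proved, stated in full; the proofs are below) =====
def Claim_unchanged_find_words_for_acr : Prop := ∀ (acronym : String) (tokens : List String), Dom_find_words_for_acr acronym tokens → Pre_find_words_for_acr acronym tokens → Spec_find_words_for_acr acronym tokens (find_words_for_acr acronym tokens)
def Claim_changed_find_words_for_acr : Prop := Dom_find_words_for_acr (pvDiffWitness_find_words_for_acr.1) (pvDiffWitness_find_words_for_acr.2) ∧ Pre_find_words_for_acr (pvDiffWitness_find_words_for_acr.1) (pvDiffWitness_find_words_for_acr.2) ∧ D_find_words_for_acr (pvDiffWitness_find_words_for_acr.1) (pvDiffWitness_find_words_for_acr.2) ∧ find_words_for_acr (pvDiffWitness_find_words_for_acr.1) (pvDiffWitness_find_words_for_acr.2) = pvDiffWitnessOut_find_words_for_acr.1 ∧ find_words_for_acr_alt (pvDiffWitness_find_words_for_acr.1) (pvDiffWitness_find_words_for_acr.2) = pvDiffWitnessOut_find_words_for_acr.2 ∧ pvDiffWitnessOut_find_words_for_acr.1 ≠ pvDiffWitnessOut_find_words_for_acr.2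
def Claim_exact_find_words_for_acr : Prop := ∀ (acronym : String) (tokens : List String), Dom_find_words_for_acr acronym tokens → Pre_find_words_for_acr acronym tokens → D_find_words_for_acr acronym tokens → find_words_for_acr acronym tokens ≠ find_words_for_acr_alt acronym tokens

-- ===== LEMMAS AND PROOFS =====

-- proof-only helpers: window, and D_'s window test in named form
def pvWin (tokens : List String) (i k : Nat) : List String := (tokens.drop i).take k

def pvAcrMatch (acr : List Char) (tokens : List String) (i : Nat) : Bool :=
  (pvWin tokens i acr.length).flatMap (fun t => (t.toList.map PySem.Chars.upperChar).take 1) == acr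

theorem D_iff (acronym : String) (tokens : List String) :
    D_find_words_for_acr acronym tokens ↔
      (pvAcrMatch acronym.toList tokens (tokens.length - acronym.toList.length) = true ∧
        ((List.range (tokens.length - acronym.toList.length)).filter
            (pvAcrMatch acronym.toList tokens)).getLast?.all
          (fun r => pvWin tokens r acronym.toList.length !=
            pvWin tokens (tokens.length - acronym.toList.length) acronym.toList.length) = true) :=
  Iff.rfl

theorem bool_eq_of_iff {a b : Bool} (h : a = true ↔ b = true) : a = b := by
  cases a <;> cases b <;> simp_all

-- A-side characterisation machinery: per-token initial list and the window test on it
def pvInitials (tokens : List String) : List (List Char) :=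
  tokens.map (fun t => PySem.Chars.upper (t.toList.take 1))

def pvMatchB (acr : List Char) (inits : List (List Char)) (i : Nat) : Bool :=
  (List.range acr.length).all (fun j => inits.getD (i + j) [] == [acr.getD j ' '])

-- last matching start index < c (w.r.t. pvMatchB), as an option
def pvLastHit (acr : List Char) (inits : List (List Char)) : Nat → Option Nat
  | 0 => none
  | c + 1 => if pvMatchB acr inits c then some c else pvLastHit acr inits c

theorem pvInitials_getD (tokens : List String) (m : Nat) :
    (pvInitials tokens).getD m [] =
      PySem.Chars.upper ((tokens.getD m "").toList.take 1) := by
  by_cases hm : m < tokens.length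
  · rw [pvInitials, List.getD_eq_getElem?_getD, List.getElem?_map, List.getElem?_eq_getElem hm,
      Option.map_some, Option.getD_some, List.getD_eq_getElem?_getD,
      List.getElem?_eq_getElem hm, Option.getD_some]
  · have h1 : (pvInitials tokens).getD m [] = [] := by
      rw [List.getD_eq_getElem?_getD, List.getElem?_eq_none (by simp [pvInitials]; omega)]
      rfl
    have h2 : tokens.getD m "" = "" := by
      rw [List.getD_eq_getElem?_getD, List.getElem?_eq_none (by omega)]
      rfl
    rw [h1, h2]
    simp [PySem.Chars.upper]

theorem length_flatMap_le {α β : Type} (g : α → List β) (hb : ∀ a, (g a).length ≤ 1) :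
    ∀ w : List α, (w.flatMap g).length ≤ w.length := by
  intro w
  induction w with
  | nil => simp
  | cons a w ih =>
    rw [List.flatMap_cons, List.length_append, List.length_cons]
    have := hb a
    omega

theorem flatMap_eq_iff_forall₂ {α β : Type} (g : α → List β) (hb : ∀ a, (g a).length ≤ 1)
    (w : List α) : ∀ acr : List β, w.length ≤ acr.length →
      (w.flatMap g = acr ↔ List.Forall₂ (fun t ch => g t = [ch]) w acr) := by
  induction w with
  | nil =>
    intro acr _hlen
    simp only [List.flatMap_nil]
    rw [List.forall₂_nil_left_iff]
    exact eq_comm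
  | cons t w ih =>
    intro acr hlen
    rw [List.flatMap_cons]
    cases hgt : g t with
    | nil =>
      rw [List.nil_append]
      constructor
      · intro h
        exfalso
        have h1 := length_flatMap_le g hb w
        have h2 : acr.length = (w.flatMap g).length := by rw [h]
        rw [List.length_cons] at hlen
        omega
      · intro h
        cases h with
        | cons hR _ => rw [hgt] at hR; cases hR
    | cons c cs =>
      have hcs : cs = [] := by
        have := hb t
        rw [hgt, List.length_cons] at this
        exact List.eq_nil_of_length_eq_zero (by omega)
      subst hcs
      constructor
      · intro h
        cases acr with
        | nil => cases h
        | cons c' acr' =>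
          rw [List.singleton_append, List.cons.injEq] at h
          obtain ⟨hc, hflat⟩ := h
          subst hc
          have hlen' : w.length ≤ acr'.length := by
            have h1 : acr'.length = (w.flatMap g).length := by rw [hflat]
            have h2 := length_flatMap_le g hb w
            rw [List.length_cons, List.length_cons] at hlen
            omega
          exact List.Forall₂.cons (by rw [hgt]) ((ih acr' hlen').mp hflat)
      · intro h
        cases h with
        | cons hR htail =>
          rw [hgt] at hR
          cases hR
          rw [List.singleton_append, List.cons.injEq]
          have hlen' : w.length ≤ List.length ‹List β› := by
            simp at hlen
            exact hlen
          exact ⟨rfl, (ih _ hlen').mpr htail⟩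

theorem forall₂_iff_matchB (acr : List Char) (tokens : List String) (i : Nat) :
    List.Forall₂ (fun t ch => (t.toList.map PySem.Chars.upperChar).take 1 = [ch])
      (pvWin tokens i acr.length) acr ↔ pvMatchB acr (pvInitials tokens) i = true := by
  have hup : ∀ t : String,
      PySem.Chars.upper (t.toList.take 1) = (t.toList.map PySem.Chars.upperChar).take 1 := by
    intro t; simp [PySem.Chars.upper, List.map_take]
  have hwget : ∀ (j : Nat) (hij : i + j < tokens.length), j < acr.length →
      ∀ (hj : j < (pvWin tokens i acr.length).length),
      (pvWin tokens i acr.length)[j] = tokens[i + j]'hij := by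
    intro j hij hja hj
    simp [pvWin, List.getElem_take, List.getElem_drop]
  constructor
  · intro hF
    have hlen := hF.length_eq
    have hlen' := hlen
    rw [pvWin, List.length_take, List.length_drop] at hlen'
    rw [pvMatchB, List.all_eq_true]
    intro j hjm
    have hj : j < acr.length := by simpa using hjm
    have hij : i + j < tokens.length := by omega
    have hjw : j < (pvWin tokens i acr.length).length := by rw [hlen]; exact hj
    have hR := (List.forall₂_iff_get.mp hF).2 j hjw (by exact hj)
    simp only [List.get_eq_getElem] at hR
    rw [hwget j hij hj hjw] at hR
    simp only [beq_iff_eq]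
    rw [pvInitials_getD]
    have hgd : tokens.getD (i + j) "" = tokens[i + j] := by
      rw [List.getD_eq_getElem?_getD, List.getElem?_eq_getElem hij, Option.getD_some]
    have hga : acr.getD j ' ' = acr[j] := by
      rw [List.getD_eq_getElem?_getD, List.getElem?_eq_getElem hj, Option.getD_some]
    rw [hgd, hup, hga, hR]
  · intro hB
    rw [pvMatchB, List.all_eq_true] at hB
    by_cases hk : acr.length = 0
    · have hw : pvWin tokens i acr.length = [] := by simp [pvWin, hk]
      have ha : acr = [] := List.eq_nil_of_length_eq_zero hk
      rw [hw, ha]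
      exact List.Forall₂.nil
    · have hik : i + acr.length ≤ tokens.length := by
        by_contra hno
        have hj : tokens.length - i < acr.length := by omega
        have hx := hB (tokens.length - i) (by simp; omega)
        simp only [beq_iff_eq] at hx
        rw [pvInitials_getD] at hx
        have hout : tokens.getD (i + (tokens.length - i)) "" = "" := by
          rw [List.getD_eq_getElem?_getD, List.getElem?_eq_none (by omega)]
          rfl
        rw [hout] at hx
        simp [PySem.Chars.upper] at hx
      rw [List.forall₂_iff_get]
      refine ⟨by rw [pvWin, List.length_take, List.length_drop]; omega, fun j hjw hj => ?_⟩
      have hij : i + j < tokens.length := by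
        have hjw' := hjw
        rw [pvWin, List.length_take, List.length_drop] at hjw'
        omega
      have hja : j < acr.length := hj
      simp only [List.get_eq_getElem]
      rw [hwget j hij hja hjw]
      have hx := hB j (by simpa using hja)
      simp only [beq_iff_eq] at hx
      rw [pvInitials_getD] at hx
      have hgd : tokens.getD (i + j) "" = tokens[i + j] := by
        rw [List.getD_eq_getElem?_getD, List.getElem?_eq_getElem hij, Option.getD_some]
      have hga : acr.getD j ' ' = acr[j]'hja := by
        rw [List.getD_eq_getElem?_getD, List.getElem?_eq_getElem hja, Option.getD_some]
      rw [hgd, hup, hga] at hx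
      exact hx

theorem pvAcrMatch_iff (acr : List Char) (tokens : List String) (i : Nat) :
    pvAcrMatch acr tokens i = true ↔ pvMatchB acr (pvInitials tokens) i = true := by
  rw [pvAcrMatch, beq_iff_eq]
  rw [flatMap_eq_iff_forall₂ _ (fun t => by rw [List.length_take]; omega)
    (pvWin tokens i acr.length) acr (by rw [pvWin, List.length_take]; omega)]
  exact forall₂_iff_matchB acr tokens i

theorem pvLastHit_eq (acr : List Char) (inits : List (List Char)) :
    ∀ c, pvLastHit acr inits c =
      ((List.range c).filter (fun i => pvMatchB acr inits i)).getLast? := by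
  intro c
  induction c with
  | zero => rfl
  | succ c ih =>
    rw [List.range_succ, List.filter_append]
    conv_lhs => rw [pvLastHit]
    by_cases hm : pvMatchB acr inits c = true
    · rw [if_pos hm]
      have hf : List.filter (fun i => pvMatchB acr inits i) [c] = [c] := by simp [hm]
      rw [hf, List.getLast?_concat]
    · rw [if_neg hm, ih]
      have hf : List.filter (fun i => pvMatchB acr inits i) [c] = [] := by simp [hm]
      rw [hf, List.append_nil]

-- a matching last window forces the acronym to fit
theorem le_of_matchB_last (acronym : String) (tokens : List String)
    (h : pvMatchB acronym.toList (pvInitials tokens)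
      (tokens.length - acronym.toList.length) = true) :
    acronym.toList.length ≤ tokens.length := by
  by_contra hno
  rw [pvMatchB, List.all_eq_true] at h
  have hx := h tokens.length (List.mem_range.mpr (by omega))
  simp only [beq_iff_eq] at hx
  rw [pvInitials_getD] at hx
  have hout : tokens.getD (tokens.length - acronym.toList.length + tokens.length) "" = "" := by
    rw [List.getD_eq_getElem?_getD, List.getElem?_eq_none (by omega)]
    rfl
  rw [hout] at hx
  simp [PySem.Chars.upper] at hx

-- the two filter predicates agree
theorem filter_acr_eq (acronym : String) (tokens : List String) (L : Nat) :
    (List.range L).filter (pvAcrMatch acronym.toList tokens) =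
      (List.range L).filter (fun i => pvMatchB acronym.toList (pvInitials tokens) i) :=
  List.filter_congr (fun a _ => bool_eq_of_iff (pvAcrMatch_iff acronym.toList tokens a))

-- a window as map over range, equals drop/take
theorem pvWin_eq_map (tokens : List String) (i k : Nat) (h : i + k ≤ tokens.length) :
    (List.range k).map (fun j => tokens.getD (i + j) "") = pvWin tokens i k := by
  apply List.ext_getElem
  · simp [pvWin]; omega
  · intro j h1 h2
    simp only [List.getElem_map, List.getElem_range, pvWin]
    simp only [List.length_map, List.length_range] at h1
    rw [List.getElem_take, List.getElem_drop, List.getD_eq_getElem?_getD,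
      List.getElem?_eq_getElem (by omega)]
    simp

-- A's n-gram fold equals the window
theorem ngram_eq (tokens : List String) (i k : Nat) (h : i + k ≤ tokens.length) :
    ((PySem.List.pyRange (i : Int) ((i : Int) + (k : Int)) 1).foldl
        (fun acc j => acc ++ [PySem.List.pyGetD tokens j ""]) []) = pvWin tokens i k := by
  rw [PySem.List.foldl_append_singleton_eq_map, List.nil_append]
  rw [PySem.List.pyRange_one]
  have h1 : (((i : Int) + (k : Int)) - (i : Int)).toNat = k := by omega
  rw [h1, List.map_map]
  rw [← pvWin_eq_map tokens i k h]
  apply List.map_congr_left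
  intro j hj
  simp only [Function.comp]
  have : ((i : Int) + (j : Int)) = ((i + j : Nat) : Int) := by push_cast; ring
  rw [this, PySem.List.pyGetD_natCast]

-- A's string test equals the window test, for a window of nonempty tokens
theorem matchA_eq_matchB (acr : List Char) (tokens : List String) (i : Nat)
    (h : i + acr.length ≤ tokens.length)
    (hne : ∀ j < acr.length, tokens.getD (i + j) "" ≠ "") :
    (acr = PySem.Chars.upper ((pvWin tokens i acr.length).map
        (fun word => (PySem.List.pyGet? word.toList 0).getD ' '))) ↔
      pvMatchB acr (pvInitials tokens) i = true := by
  have hlen : (pvWin tokens i acr.length).length = acr.length := by simp [pvWin]; omega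
  have hup : PySem.Chars.upper ((pvWin tokens i acr.length).map
      (fun word => (PySem.List.pyGet? word.toList 0).getD ' ')) =
      (pvWin tokens i acr.length).map
        (fun word => PySem.Chars.upperChar ((PySem.List.pyGet? word.toList 0).getD ' ')) := by
    simp [PySem.Chars.upper, List.map_map]
  have hfacts : ∀ j (hj : j < acr.length), ∃ c : Char,
      (pvInitials tokens).getD (i + j) [] = [PySem.Chars.upperChar c] ∧
      ((pvWin tokens i acr.length).map
        (fun word => PySem.Chars.upperChar ((PySem.List.pyGet? word.toList 0).getD ' ')))[j]? =
          some (PySem.Chars.upperChar c) := by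
    intro j hj
    have hij : i + j < tokens.length := by omega
    have hnej : tokens[i + j] ≠ "" := by
      have := hne j hj
      rwa [List.getD_eq_getElem?_getD, List.getElem?_eq_getElem hij, Option.getD_some] at this
    obtain ⟨c, cs, hcs⟩ : ∃ c cs, tokens[i + j].toList = c :: cs := by
      cases hx : tokens[i + j].toList with
      | nil => exact absurd (by ext1; simp [hx] : tokens[i + j] = "") hnej
      | cons c cs => exact ⟨c, cs, rfl⟩
    refine ⟨c, ?_, ?_⟩
    · rw [pvInitials, List.getD_eq_getElem?_getD, List.getElem?_map, List.getElem?_eq_getElem hij]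
      simp [hcs, PySem.Chars.upper]
    · have hw : (pvWin tokens i acr.length)[j]? = some tokens[i + j] := by
        rw [List.getElem?_eq_getElem (by omega)]
        simp [pvWin, List.getElem_take, List.getElem_drop]
      rw [List.getElem?_map, hw]
      simp [hcs]
  rw [hup, pvMatchB, List.all_eq_true]
  constructor
  · intro heq j hjm
    have hj : j < acr.length := by simpa using hjm
    obtain ⟨c, hinit, hmap⟩ := hfacts j hj
    have hacr : acr[j]? = some (PySem.Chars.upperChar c) := by rw [heq]; exact hmap
    have hgd : acr.getD j ' ' = PySem.Chars.upperChar c := by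
      rw [List.getD_eq_getElem?_getD, hacr, Option.getD_some]
    simp only [beq_iff_eq]
    rw [hinit, hgd]
  · intro hall
    apply List.ext_getElem?
    intro j
    by_cases hj : j < acr.length
    · obtain ⟨c, hinit, hmap⟩ := hfacts j hj
      have hjr := hall j (by simpa using hj)
      rw [beq_iff_eq, hinit] at hjr
      have hgd : acr.getD j ' ' = acr[j]'hj := by
        rw [List.getD_eq_getElem?_getD, List.getElem?_eq_getElem hj, Option.getD_some]
      rw [hgd] at hjr
      have hcj : acr[j]'hj = PySem.Chars.upperChar c := by
        exact (List.cons_eq_cons.mp hjr.symm).1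
      rw [List.getElem?_eq_getElem hj, hmap, hcj]
    · rw [List.getElem?_eq_none (by omega), List.getElem?_eq_none (by simp [hlen]; omega)]

-- A's loop, characterised by pvLastHit over [0, bnd) (fuel c, index bnd - c)
theorem findAcrUp_eq_aux (acronym : String) (tokens : List String)
    (hpre : Pre_find_words_for_acr acronym tokens)
    (hkn : acronym.toList.length ≤ tokens.length) :
    ∀ c, c ≤ tokens.length - acronym.toList.length →
    ∀ m, m = (match pvLastHit acronym.toList (pvInitials tokens)
        (tokens.length - acronym.toList.length - c) with
      | some r => [(acronym, pvWin tokens r acronym.toList.length)]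
      | none => ([] : List (String × List String))) →
    findAcrUp acronym tokens c ((tokens.length - acronym.toList.length - c : Nat) : Int) m =
      match pvLastHit acronym.toList (pvInitials tokens) (tokens.length - acronym.toList.length) with
      | some r => [(acronym, pvWin tokens r acronym.toList.length)]
      | none => ([] : List (String × List String)) := by
  intro c
  induction c with
  | zero =>
    intro _ m hm
    simpa [findAcrUp] using hm
  | succ c ih =>
    intro hc m hm
    have hi : tokens.length - acronym.toList.length - (c + 1) < tokens.length - acronym.toList.length := by omega
    have hik : (tokens.length - acronym.toList.length - (c + 1)) + acronym.toList.length ≤ tokens.length := by omega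
    have hlt : (((tokens.length - acronym.toList.length - (c + 1) : Nat)) : Int) <
        (tokens.length : Int) - (acronym.toList.length : Int) := by push_cast; omega
    have hne : ∀ j < acronym.toList.length,
        tokens.getD ((tokens.length - acronym.toList.length - (c + 1)) + j) "" ≠ "" := by
      intro j hj
      have hij : (tokens.length - acronym.toList.length - (c + 1)) + j < tokens.length := by omega
      rw [List.getD_eq_getElem?_getD, List.getElem?_eq_getElem hij, Option.getD_some]
      intro hemp
      have hmem : "" ∈ tokens.dropLast := by
        rw [List.dropLast_eq_take]
        refine List.mem_take_iff_getElem.mpr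
          ⟨(tokens.length - acronym.toList.length - (c + 1)) + j, by omega, hemp⟩
      rcases hpre with h | h | h
      · simp [h] at hj
      · omega
      · exact h hmem
    have hng := ngram_eq tokens (tokens.length - acronym.toList.length - (c + 1))
      acronym.toList.length hik
    have hmv := matchA_eq_matchB acronym.toList tokens
      (tokens.length - acronym.toList.length - (c + 1)) hik hne
    simp only [findAcrUp, if_pos hlt, hng]
    have hcast : (((tokens.length - acronym.toList.length - (c + 1) : Nat)) : Int) + 1 =
        (((tokens.length - acronym.toList.length - c : Nat)) : Int) := by push_cast; omega
    rw [hcast]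
    have hsucc : tokens.length - acronym.toList.length - c =
        (tokens.length - acronym.toList.length - (c + 1)) + 1 := by omega
    split_ifs with hcond
    · apply ih (by omega)
      rw [hsucc]
      unfold pvLastHit
      rw [if_pos (hmv.mp hcond)]
    · apply ih (by omega)
      rw [hsucc]
      unfold pvLastHit
      rw [if_neg (fun hh => hcond (hmv.mpr hh))]
      exact hm

-- A in closed form (under Pre_, when the acronym fits)
theorem find_words_for_acr_eq (acronym : String) (tokens : List String)
    (hpre : Pre_find_words_for_acr acronym tokens)
    (hkn : acronym.toList.length ≤ tokens.length) :
    find_words_for_acr acronym tokens =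
      match pvLastHit acronym.toList (pvInitials tokens) (tokens.length - acronym.toList.length) with
      | some r => [(acronym, pvWin tokens r acronym.toList.length)]
      | none => ([] : List (String × List String)) := by
  have h := findAcrUp_eq_aux acronym tokens hpre hkn (tokens.length - acronym.toList.length)
    le_rfl [] (by simp [pvLastHit])
  have hfuel : ((tokens.length : Int) - (acronym.toList.length : Int)).toNat =
      tokens.length - acronym.toList.length := by omega
  have hzero : (((tokens.length - acronym.toList.length -
      (tokens.length - acronym.toList.length) : Nat)) : Int) = 0 := by
    push_cast; omega
  rw [hzero] at h
  rw [find_words_for_acr, hfuel]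
  exact h

-- A is [] when the acronym is at least as long as the token list (the loop never runs)
theorem A_nil_of_le (acronym : String) (tokens : List String)
    (h : tokens.length ≤ acronym.toList.length) :
    find_words_for_acr acronym tokens = [] := by
  have h1 : ((tokens.length : Int) - (acronym.toList.length : Int)).toNat = 0 := by omega
  rw [find_words_for_acr, h1]; rfl

-- ===== B-side machinery: initials string and rfind =====

-- the joined uppercased-initials string
def pvInitStr (tokens : List String) : List Char :=
  tokens.flatMap (fun t => (t.toList.map PySem.Chars.upperChar).take 1)

theorem join_nil_flatten : ∀ parts : List (List Char), PySem.Chars.join [] parts = parts.flatten := by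
  intro parts
  induction parts with
  | nil => rfl
  | cons a l ih =>
    cases l with
    | nil => rw [PySem.Chars.join_singleton, List.flatten_cons, List.flatten_nil, List.append_nil]
    | cons b l' =>
      rw [PySem.Chars.join_cons_cons, ih]
      simp

theorem initials_eq (tokens : List String) :
    PySem.Chars.upper (PySem.Chars.join []
        (tokens.map (fun t => PySem.Chars.slice t.toList none (some 1)))) =
      pvInitStr tokens := by
  rw [join_nil_flatten]
  have hsl : ∀ t : String, PySem.Chars.slice t.toList none (some 1) = t.toList.take 1 := by
    intro t
    rw [PySem.Chars.slice_eq_listSlice, PySem.List.slice_to t.toList (by norm_num : (0:Int) ≤ 1)]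
    rfl
  simp only [hsl, PySem.Chars.upper, pvInitStr, List.flatMap, List.map_flatten, List.map_map]
  congr 1
  apply List.map_congr_left
  intro t _
  simp [List.map_take]

-- rfind.go in closed form: the last index j ≤ c at which sub is a prefix of s.drop j
theorem rfind_go_eq (s sub : List Char) : ∀ c, PySem.Chars.rfind.go s sub c =
    (((List.range (c + 1)).filter (fun j => sub.isPrefixOf (s.drop j))).getLast?).elim
      (-1) (fun r => (r : Int)) := by
  intro c
  induction c with
  | zero =>
    have hgo : PySem.Chars.rfind.go s sub 0 = if sub.isPrefixOf s then 0 else -1 := by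
      simp [PySem.Chars.rfind.go]
    rw [hgo]
    by_cases h : sub.isPrefixOf s <;> simp [h]
  | succ c ih =>
    have hgo : PySem.Chars.rfind.go s sub (c + 1) =
        if sub.isPrefixOf (s.drop (c + 1)) then ((c : Int) + 1)
        else PySem.Chars.rfind.go s sub c := by
      simp [PySem.Chars.rfind.go]
    rw [hgo, List.range_succ, List.filter_append]
    by_cases h : sub.isPrefixOf (s.drop (c + 1))
    · rw [if_pos h]
      have hf : List.filter (fun j => sub.isPrefixOf (s.drop j)) [c + 1] = [c + 1] := by simp [h]
      rw [hf, List.getLast?_concat]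
      simp
    · rw [if_neg h, ih]
      have hf : List.filter (fun j => sub.isPrefixOf (s.drop j)) [c + 1] = [] := by simp [h]
      rw [hf, List.append_nil]

-- flatMap over length-1 pieces commutes with drop / take, and preserves length
theorem flatMap_drop {α β : Type} (g : α → List β) :
    ∀ (ts : List α), (∀ t ∈ ts, (g t).length = 1) →
      ∀ j, (ts.flatMap g).drop j = (ts.drop j).flatMap g := by
  intro ts
  induction ts with
  | nil => intro _ j; simp
  | cons t ts ih =>
    intro h j
    obtain ⟨c, hc⟩ := List.length_eq_one_iff.mp (h t (List.mem_cons_self))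
    cases j with
    | zero => simp
    | succ j =>
      rw [List.flatMap_cons, hc, List.singleton_append, List.drop_succ_cons,
        List.drop_succ_cons]
      exact ih (fun a ha => h a (List.mem_cons_of_mem _ ha)) j

theorem flatMap_take {α β : Type} (g : α → List β) :
    ∀ (ts : List α), (∀ t ∈ ts, (g t).length = 1) →
      ∀ j, (ts.flatMap g).take j = (ts.take j).flatMap g := by
  intro ts
  induction ts with
  | nil => intro _ j; simp
  | cons t ts ih =>
    intro h j
    obtain ⟨c, hc⟩ := List.length_eq_one_iff.mp (h t (List.mem_cons_self))
    cases j with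
    | zero => simp
    | succ j =>
      rw [List.flatMap_cons, hc, List.singleton_append, List.take_succ_cons,
        List.take_succ_cons, List.flatMap_cons, hc, List.singleton_append]
      rw [ih (fun a ha => h a (List.mem_cons_of_mem _ ha)) j]

theorem length_flatMap_eq {α β : Type} (g : α → List β) :
    ∀ (ts : List α), (∀ t ∈ ts, (g t).length = 1) → (ts.flatMap g).length = ts.length := by
  intro ts
  induction ts with
  | nil => intro _; simp
  | cons t ts ih =>
    intro h
    rw [List.flatMap_cons, List.length_append, h t (List.mem_cons_self),
      ih (fun a ha => h a (List.mem_cons_of_mem _ ha)), List.length_cons]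
    omega

theorem length_flatMap_lt {α β : Type} (g : α → List β) (hb : ∀ a, (g a).length ≤ 1)
    (a0 : α) (h0 : g a0 = []) :
    ∀ (ts : List α), a0 ∈ ts → (ts.flatMap g).length < ts.length := by
  intro ts
  induction ts with
  | nil => intro h; cases h
  | cons t ts ih =>
    intro h
    rw [List.flatMap_cons, List.length_append, List.length_cons]
    rcases List.mem_cons.mp h with h | h
    · subst h
      rw [h0]
      have := length_flatMap_le g hb ts
      simp only [List.length_nil]
      omega
    · have := ih h
      have := hb t
      omega

-- the per-token pieces have length 1 exactly on nonempty tokens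
theorem g_length_one (ts : List String) (hne : ∀ t ∈ ts, t ≠ "") :
    ∀ t ∈ ts, ((t.toList.map PySem.Chars.upperChar).take 1).length = 1 := by
  intro t ht
  have h1 : t.toList ≠ [] := by
    intro hx
    exact hne t ht (by ext1; simp [hx])
  rw [List.length_take, List.length_map]
  cases hx : t.toList with
  | nil => exact absurd hx h1
  | cons c cs => simp

-- prefix test on the initials string = the window test, for nonempty tokens
theorem prefix_eq_match (acr : List Char) (ts : List String) (hne : ∀ t ∈ ts, t ≠ "") (j : Nat) :
    acr.isPrefixOf ((pvInitStr ts).drop j) = pvAcrMatch acr ts j := by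
  have h1 := g_length_one ts hne
  have h1d : ∀ t ∈ ts.drop j, ((t.toList.map PySem.Chars.upperChar).take 1).length = 1 :=
    fun t ht => h1 t (List.mem_of_mem_drop ht)
  apply bool_eq_of_iff
  rw [List.isPrefixOf_iff_prefix, List.prefix_iff_eq_take, pvInitStr,
    flatMap_drop _ ts h1 j, flatMap_take _ (ts.drop j) h1d acr.length]
  rw [pvAcrMatch, beq_iff_eq, pvWin]
  exact eq_comm

-- B in closed form: the rightmost j ≤ |initials| at which the acronym prefixes initials.drop j
theorem alt_closed (acronym : String) (tokens : List String) :
    find_words_for_acr_alt acronym tokens =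
      match (((List.range ((pvInitStr tokens).length + 1)).filter
          (fun j => acronym.toList.isPrefixOf ((pvInitStr tokens).drop j))).getLast?) with
      | some r => [(acronym, pvWin tokens r acronym.toList.length)]
      | none => [] := by
  show (let initials := PySem.Chars.upper (PySem.Chars.join []
      (tokens.map (fun t => PySem.Chars.slice t.toList none (some 1))))
    let pos := PySem.Chars.rfind initials acronym.toList
    if pos = -1 then []
    else [(acronym, PySem.List.slice tokens (some pos)
      (some (pos + (acronym.toList.length : Int))))]) = _
  simp only [initials_eq]
  show (let pos := PySem.Chars.rfind (pvInitStr tokens) acronym.toList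
    if pos = -1 then []
    else [(acronym, PySem.List.slice tokens (some pos)
      (some (pos + (acronym.toList.length : Int))))]) = _
  have hrf : PySem.Chars.rfind (pvInitStr tokens) acronym.toList =
      PySem.Chars.rfind.go (pvInitStr tokens) acronym.toList (pvInitStr tokens).length := rfl
  simp only [hrf, rfind_go_eq]
  cases hlast : (((List.range ((pvInitStr tokens).length + 1)).filter
      (fun j => acronym.toList.isPrefixOf ((pvInitStr tokens).drop j))).getLast?) with
  | none => simp
  | some r =>
    have hne : ((r : Nat) : Int) ≠ -1 := by omega
    simp only [Option.elim_some, if_neg hne]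
    have hsl : PySem.List.slice tokens (some ((r : Nat) : Int))
        (some (((r : Nat) : Int) + (acronym.toList.length : Int))) =
        pvWin tokens r acronym.toList.length := by
      rw [PySem.List.slice_natCast_add]; rfl
    rw [hsl]

-- windows that overrun the list never match
theorem acrMatch_false_of_lt (acr : List Char) (ts : List String) (j : Nat)
    (hk : acr.length ≠ 0) (h : ts.length < j + acr.length) : pvAcrMatch acr ts j = false := by
  rw [pvAcrMatch]
  apply beq_eq_false_iff_ne.mpr
  intro hx
  have h1 := length_flatMap_le (fun t : String => (t.toList.map PySem.Chars.upperChar).take 1)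
    (fun t => by rw [List.length_take]; omega) (pvWin ts j acr.length)
  have h2 : (pvWin ts j acr.length).length ≤ ts.length - j := by
    rw [pvWin, List.length_take, List.length_drop]; omega
  have h3 : acr.length = ((pvWin ts j acr.length).flatMap
      (fun t => (t.toList.map PySem.Chars.upperChar).take 1)).length := by rw [hx]
  omega

-- a filter over range b shrinks to range a when the predicate is false from a on
theorem filter_range_stable (P : Nat → Bool) (a : Nat) :
    ∀ b, a ≤ b → (∀ j, a ≤ j → P j = false) →
      (List.range b).filter P = (List.range a).filter P := by
  intro b
  induction b with
  | zero => intro h _; rw [Nat.le_zero.mp h]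
  | succ c ih =>
    intro h hP
    by_cases hac : a = c + 1
    · rw [hac]
    · have hle : a ≤ c := by omega
      rw [List.range_succ, List.filter_append]
      have hf : List.filter P [c] = [] := by simp [hP c hle]
      rw [hf, List.append_nil]
      exact ih hle hP

theorem length_pvInitStr_le (ts : List String) : (pvInitStr ts).length ≤ ts.length :=
  length_flatMap_le _ (fun t => by rw [List.length_take]; omega) ts

theorem length_pvInitStr_lt (ts : List String) (hmem : "" ∈ ts) :
    (pvInitStr ts).length < ts.length :=
  length_flatMap_lt _ (fun t => by rw [List.length_take]; omega) "" rfl ts hmem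

-- B is [] when the initials string is shorter than the acronym
theorem alt_nil_of_short (acronym : String) (tokens : List String)
    (h : (pvInitStr tokens).length < acronym.toList.length) :
    find_words_for_acr_alt acronym tokens = [] := by
  rw [alt_closed]
  have hf : ((List.range ((pvInitStr tokens).length + 1)).filter
      (fun j => acronym.toList.isPrefixOf ((pvInitStr tokens).drop j))) = [] := by
    rw [List.filter_eq_nil_iff]
    intro j _
    intro hp
    have hpre := List.isPrefixOf_iff_prefix.mp hp
    have h1 := hpre.length_le
    rw [List.length_drop] at h1
    omega
  rw [hf]
  rfl

-- B's closed form coincides with pvLastHit when no token is empty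
theorem alt_eq_of_no_empty (acronym : String) (tokens : List String) (hemp : "" ∉ tokens) :
    find_words_for_acr_alt acronym tokens =
      match pvLastHit acronym.toList (pvInitials tokens)
          (tokens.length - acronym.toList.length + 1) with
      | some r => [(acronym, pvWin tokens r acronym.toList.length)]
      | none => ([] : List (String × List String)) := by
  have hne : ∀ t ∈ tokens, t ≠ "" := fun t ht hx => hemp (hx ▸ ht)
  have hlen : (pvInitStr tokens).length = tokens.length :=
    length_flatMap_eq _ tokens (g_length_one tokens hne)
  rw [alt_closed, hlen]
  have hstep1 : (List.range (tokens.length + 1)).filter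
      (fun j => acronym.toList.isPrefixOf ((pvInitStr tokens).drop j)) =
      (List.range (tokens.length + 1)).filter (pvAcrMatch acronym.toList tokens) :=
    List.filter_congr (fun j _ => prefix_eq_match acronym.toList tokens hne j)
  have hstep2 : (List.range (tokens.length + 1)).filter (pvAcrMatch acronym.toList tokens) =
      (List.range (tokens.length - acronym.toList.length + 1)).filter
        (pvAcrMatch acronym.toList tokens) := by
    by_cases hk : acronym.toList.length = 0
    · rw [hk, Nat.sub_zero]
    · apply filter_range_stable _ _ _ (by omega)
      intro j hj
      exact acrMatch_false_of_lt _ _ _ hk (by omega)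
  rw [hstep1, hstep2, filter_acr_eq, ← pvLastHit_eq]

-- the dropLast window equals the full window when it fits
theorem win_dropLast (tokens : List String) (j k : Nat) (h : j + k ≤ tokens.length - 1) :
    pvWin tokens.dropLast j k = pvWin tokens j k := by
  rw [pvWin, pvWin, List.dropLast_eq_take, List.drop_take, List.take_take]
  congr 1
  omega

-- A = B whenever Pre_ holds and some token is empty (then the last window cannot match)
theorem AB_eq_of_empty (acronym : String) (tokens : List String)
    (hpre : Pre_find_words_for_acr acronym tokens) (hemp : "" ∈ tokens) :
    find_words_for_acr acronym tokens = find_words_for_acr_alt acronym tokens := by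
  have hnil : tokens ≠ [] := List.ne_nil_of_mem hemp
  have hn1 : 1 ≤ tokens.length := List.length_pos_of_ne_nil hnil
  by_cases hk : acronym.toList.length = 0
  · -- empty acronym: both return [(acronym, [])]
    have ha : acronym.toList = [] := List.eq_nil_of_length_eq_zero hk
    have hA : find_words_for_acr acronym tokens = [(acronym, [])] := by
      rw [find_words_for_acr_eq acronym tokens hpre (by omega)]
      have hM : pvMatchB acronym.toList (pvInitials tokens) (tokens.length - 1) = true := by
        rw [pvMatchB, ha]
        simp
      have hL : pvLastHit acronym.toList (pvInitials tokens)
          (tokens.length - acronym.toList.length) = some (tokens.length - 1) := by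
        have hrw : tokens.length - acronym.toList.length = (tokens.length - 1) + 1 := by omega
        rw [hrw]
        unfold pvLastHit
        rw [if_pos hM]
      rw [hL]
      have hw0 : pvWin tokens (tokens.length - 1) acronym.toList.length = [] := by
        simp [pvWin, hk]
      exact congrArg (fun w => [(acronym, w)]) hw0
    have hB : find_words_for_acr_alt acronym tokens = [(acronym, [])] := by
      rw [alt_closed]
      have hf : ((List.range ((pvInitStr tokens).length + 1)).filter
          (fun j => acronym.toList.isPrefixOf ((pvInitStr tokens).drop j))) =
          List.range ((pvInitStr tokens).length + 1) := by
        apply List.filter_eq_self.mpr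
        intro j _
        rw [ha]
        simp [List.isPrefixOf]
      rw [hf, List.range_succ, List.getLast?_concat]
      have hw0 : pvWin tokens (pvInitStr tokens).length acronym.toList.length = [] := by
        simp [pvWin, hk]
      exact congrArg (fun w => [(acronym, w)]) hw0
    rw [hA, hB]
  · by_cases hnk : tokens.length ≤ acronym.toList.length
    · rw [A_nil_of_le acronym tokens hnk,
        alt_nil_of_short acronym tokens (lt_of_lt_of_le (length_pvInitStr_lt tokens hemp) hnk)]
    · -- acronym fits strictly, so Pre_ forces the empty token to be the LAST one
      have hkn : acronym.toList.length < tokens.length := by omega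
      have hdl : "" ∉ tokens.dropLast := by
        rcases hpre with h | h | h
        · exact absurd (by rw [h]; rfl) hk
        · omega
        · exact h
      have htok : tokens.dropLast ++ [""] = tokens := by
        have h1 := List.dropLast_append_getLast hnil
        have h2 : tokens.getLast hnil = "" := by
          rcases List.mem_append.mp (h1 ▸ hemp) with h | h
          · exact absurd h hdl
          · exact (List.mem_singleton.mp h).symm
        rw [← h2]
        exact h1
      have hneD : ∀ t ∈ tokens.dropLast, t ≠ "" := fun t ht hx => hdl (hx ▸ ht)
      have hlenD : tokens.dropLast.length = tokens.length - 1 := List.length_dropLast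
      have hS : pvInitStr tokens = pvInitStr tokens.dropLast := by
        conv_lhs => rw [← htok]
        rw [pvInitStr, pvInitStr, List.flatMap_append]
        simp
      have hSlen : (pvInitStr tokens.dropLast).length = tokens.length - 1 := by
        unfold pvInitStr
        rw [length_flatMap_eq _ _ (g_length_one _ hneD), hlenD]
      rw [alt_closed]
      simp only [hS, hSlen]
      have hrw1 : tokens.length - 1 + 1 = tokens.length := by omega
      rw [hrw1]
      have hstep1 : (List.range tokens.length).filter
          (fun j => acronym.toList.isPrefixOf ((pvInitStr tokens.dropLast).drop j)) =
          (List.range tokens.length).filter (pvAcrMatch acronym.toList tokens.dropLast) :=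
        List.filter_congr (fun j _ => prefix_eq_match acronym.toList tokens.dropLast hneD j)
      have hstep2 : (List.range tokens.length).filter (pvAcrMatch acronym.toList tokens.dropLast) =
          (List.range (tokens.length - acronym.toList.length)).filter
            (pvAcrMatch acronym.toList tokens.dropLast) := by
        apply filter_range_stable _ _ _ (by omega)
        intro j hj
        exact acrMatch_false_of_lt _ _ _ hk (by omega)
      have hstep3 : (List.range (tokens.length - acronym.toList.length)).filter
          (pvAcrMatch acronym.toList tokens.dropLast) =
          (List.range (tokens.length - acronym.toList.length)).filter
            (pvAcrMatch acronym.toList tokens) := by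
        apply List.filter_congr
        intro j hjm
        have hj : j < tokens.length - acronym.toList.length := List.mem_range.mp hjm
        rw [pvAcrMatch, pvAcrMatch, win_dropLast tokens j acronym.toList.length (by omega)]
      rw [hstep1, hstep2, hstep3]
      rw [find_words_for_acr_eq acronym tokens hpre (by omega), pvLastHit_eq, ← filter_acr_eq]

-- D_ cannot hold when Pre_ holds and some token is empty
theorem not_D_of_empty (acronym : String) (tokens : List String)
    (hpre : Pre_find_words_for_acr acronym tokens) (hemp : "" ∈ tokens) :
    ¬ D_find_words_for_acr acronym tokens := by
  have hnil : tokens ≠ [] := List.ne_nil_of_mem hemp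
  have hn1 : 1 ≤ tokens.length := List.length_pos_of_ne_nil hnil
  rw [D_iff]
  rintro ⟨hsp, hall⟩
  by_cases hk : acronym.toList.length = 0
  · -- k = 0: every window matches, and all windows are [], so the bne test fails
    have ha : acronym.toList = [] := List.eq_nil_of_length_eq_zero hk
    have hallM : ∀ i, pvAcrMatch acronym.toList tokens i = true := by
      intro i
      rw [pvAcrMatch, ha]
      simp [pvWin]
    have hf : (List.range (tokens.length - acronym.toList.length)).filter
        (pvAcrMatch acronym.toList tokens) = List.range (tokens.length - acronym.toList.length) := by
      apply List.filter_eq_self.mpr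
      intro j _
      exact hallM j
    rw [hf] at hall
    have hrw : tokens.length - acronym.toList.length = (tokens.length - 1) + 1 := by omega
    rw [hrw, List.range_succ, List.getLast?_concat] at hall
    simp only [Option.all_some, bne_iff_ne] at hall
    apply hall
    simp [pvWin, hk]
  · -- k ≥ 1: the last window contains the empty token, so it cannot match
    have hwinmem : "" ∈ pvWin tokens (tokens.length - acronym.toList.length) acronym.toList.length := by
      by_cases hnk : tokens.length ≤ acronym.toList.length
      · have hL : tokens.length - acronym.toList.length = 0 := by omega
        rw [hL, pvWin, List.drop_zero, List.take_of_length_le hnk]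
        exact hemp
      · have hdl : "" ∉ tokens.dropLast := by
          rcases hpre with h | h | h
          · exact absurd (by rw [h]; rfl) hk
          · omega
          · exact h
        have htok : tokens.dropLast ++ [""] = tokens := by
          have h1 := List.dropLast_append_getLast hnil
          have h2 : tokens.getLast hnil = "" := by
            rcases List.mem_append.mp (h1 ▸ hemp) with h | h
            · exact absurd h hdl
            · exact (List.mem_singleton.mp h).symm
          rw [← h2]
          exact h1
        have hdrop : (tokens.drop (tokens.length - acronym.toList.length)).length =
            acronym.toList.length := by rw [List.length_drop]; omega
        rw [pvWin, List.take_of_length_le (by omega)]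
        have hdd : tokens.drop (tokens.length - acronym.toList.length) =
            tokens.dropLast.drop (tokens.length - acronym.toList.length) ++ [""] := by
          have h3 : (tokens.dropLast ++ [""]).drop (tokens.length - acronym.toList.length) =
              tokens.dropLast.drop (tokens.length - acronym.toList.length) ++ [""] :=
            List.drop_append_of_le_length (by rw [List.length_dropLast]; omega)
          exact (congrArg (List.drop (tokens.length - acronym.toList.length)) htok).symm.trans h3
        rw [hdd]
        exact List.mem_append_right _ (List.mem_singleton.mpr rfl)
    have hfalse : pvAcrMatch acronym.toList tokens (tokens.length - acronym.toList.length) = false := by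
      rw [pvAcrMatch]
      apply beq_eq_false_iff_ne.mpr
      intro hx
      have hlt := length_flatMap_lt (fun t : String => (t.toList.map PySem.Chars.upperChar).take 1)
        (fun t => by rw [List.length_take]; omega) "" rfl _ hwinmem
      have h2 : (pvWin tokens (tokens.length - acronym.toList.length) acronym.toList.length).length ≤
          acronym.toList.length := by rw [pvWin, List.length_take]; omega
      have h3 : acronym.toList.length = ((pvWin tokens (tokens.length - acronym.toList.length)
          acronym.toList.length).flatMap
            (fun t => (t.toList.map PySem.Chars.upperChar).take 1)).length := by rw [hx]
      omega
    rw [hsp] at hfalse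
    cases hfalse

-- ===== VERDICT (by name: the statement is the Claim_ definition above) =====
theorem find_words_for_acr_spec : Claim_unchanged_find_words_for_acr := by
  intro acronym tokens _hdom hpre hnd
  by_cases hemp : "" ∈ tokens
  · exact AB_eq_of_empty acronym tokens hpre hemp
  · rw [D_iff] at hnd
    by_cases hlast : pvMatchB acronym.toList (pvInitials tokens)
        (tokens.length - acronym.toList.length) = true
    swap
    · -- the last window does not match: both programs search the same range
      by_cases hkn : acronym.toList.length ≤ tokens.length
      · rw [find_words_for_acr_eq acronym tokens hpre hkn,
          alt_eq_of_no_empty acronym tokens hemp]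
        have hlh1 : pvLastHit acronym.toList (pvInitials tokens)
            (tokens.length - acronym.toList.length + 1) =
            pvLastHit acronym.toList (pvInitials tokens)
              (tokens.length - acronym.toList.length) := by
          conv_lhs => rw [pvLastHit]
          rw [if_neg hlast]
        rw [hlh1]
      · rw [A_nil_of_le acronym tokens (by omega),
          alt_nil_of_short acronym tokens
            (lt_of_le_of_lt (length_pvInitStr_le tokens) (by omega))]
    · -- the last window matches; ¬D_ gives an earlier match with the very same window
      have hkn := le_of_matchB_last acronym tokens hlast
      rw [find_words_for_acr_eq acronym tokens hpre hkn,
        alt_eq_of_no_empty acronym tokens hemp]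
      have hlh1 : pvLastHit acronym.toList (pvInitials tokens)
          (tokens.length - acronym.toList.length + 1) =
          some (tokens.length - acronym.toList.length) := by
        conv_lhs => rw [pvLastHit]
        rw [if_pos hlast]
      rw [hlh1]
      have hsp := (pvAcrMatch_iff acronym.toList tokens
        (tokens.length - acronym.toList.length)).mpr hlast
      have hall : ¬ (((List.range (tokens.length - acronym.toList.length)).filter
          (pvAcrMatch acronym.toList tokens)).getLast?.all
            (fun r => pvWin tokens r acronym.toList.length !=
              pvWin tokens (tokens.length - acronym.toList.length) acronym.toList.length) = true) :=
        fun hA => hnd ⟨hsp, hA⟩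
      rw [filter_acr_eq, ← pvLastHit_eq] at hall
      cases hlh : pvLastHit acronym.toList (pvInitials tokens)
          (tokens.length - acronym.toList.length) with
      | none =>
        exfalso
        apply hall
        rw [hlh]
        rfl
      | some r =>
        have hwin : pvWin tokens r acronym.toList.length =
            pvWin tokens (tokens.length - acronym.toList.length) acronym.toList.length := by
          by_contra hne
          apply hall
          rw [hlh]
          simp only [Option.all_some, bne_iff_ne]
          exact hne
        simp only [hwin]

theorem find_words_for_acr_changed : Claim_changed_find_words_for_acr := by
  unfold Claim_changed_find_words_for_acr; decide

theorem find_words_for_acr_tight : Claim_exact_find_words_for_acr := by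
  intro acronym tokens _hdom hpre hd heq
  by_cases hemp : "" ∈ tokens
  · exact not_D_of_empty acronym tokens hpre hemp hd
  · rw [D_iff] at hd
    obtain ⟨hsp, hall⟩ := hd
    have hlast := (pvAcrMatch_iff acronym.toList tokens
      (tokens.length - acronym.toList.length)).mp hsp
    have hkn := le_of_matchB_last acronym tokens hlast
    rw [find_words_for_acr_eq acronym tokens hpre hkn,
      alt_eq_of_no_empty acronym tokens hemp] at heq
    have hlh1 : pvLastHit acronym.toList (pvInitials tokens)
        (tokens.length - acronym.toList.length + 1) =
        some (tokens.length - acronym.toList.length) := by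
      conv_lhs => rw [pvLastHit]
      rw [if_pos hlast]
    rw [hlh1] at heq
    rw [filter_acr_eq, ← pvLastHit_eq] at hall
    cases hlh : pvLastHit acronym.toList (pvInitials tokens)
        (tokens.length - acronym.toList.length) with
    | none => rw [hlh] at heq; cases heq
    | some r =>
      rw [hlh] at heq
      have hwin : pvWin tokens r acronym.toList.length =
          pvWin tokens (tokens.length - acronym.toList.length) acronym.toList.length := by
        injection heq with h1 _
        exact congrArg Prod.snd h1
      rw [hlh] at hall
      simp only [Option.all_some, bne_iff_ne] at hall
      exact hall hwin
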